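-- pv_equiv track=rewrite | github.com/Vitto28/Chan-Visualizer | geometry.py | left_tangent_point
-- ===== SOURCE A (Python) =====
-- from typing import Tuple, List
--
-- Point = Tuple[int, int]
--
-- def orientation_test(p: Point, q: Point, r: Point) -> int:
--     """Returns the orientation of the ordered triplet (p, q, r).
--     0 -> p, q and r are collinear
--     1 -> if counter-clockwise (left turn)
--     -1 -> if clockwise (right turn)
--     """
--
--     x1, y1 = p
--     x2, y2 = q
--     x3, y3 = r
--     det = (y2 - y1) * (x3 - x2) - (x2 - x1) * (y3 - y2)
--     if det > 0:
--         return 1  # Counter-clockwise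
--     elif det < 0:
--         return -1  # Clockwise
--     else:
--         return 0  # Collinear
--
-- def left_tangent_point(hull: List[Point], q: Point) -> int:
--     """Finds the index of the left tangent point from the given point q to the convex hull by using binary search."""
--     n = len(hull)
--     if n == 0:
--         return -1
--     if n == 1:
--         return 0
--     low, high = 0, n - 1
--     while low <= high:
--         mid = (low + high) // 2
--         next_index = (mid + 1) % n
--         prev_index = (mid - 1 + n) % n
--
--         p = hull[mid]
--         p_next = hull[next_index]
--         p_prev = hull[prev_index]
--
--         if orientation_test(q, p, p_next) >= 0 and orientation_test(q, p, p_prev) >= 0: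
--             return mid
--         elif orientation_test(q, p, p_prev) < 0:
--             # p_prev lies on the wrong side
--             high = mid - 1
--         else:
--             # p_next lies on the wrong side
--             low = mid + 1
--     return low % n
-- ===== SOURCE B (Python) =====
-- def left_tangent_point(hull, q):
--     """Recursive binary search; compares raw cross products instead of
--     classifying orientations, recursing left/right on the failing side."""
--     n = len(hull)
--     if n == 0:
--         return -1
--     if n == 1:
--         return 0
--     qx, qy = q
--
--     def cross(p, r):
--         return (p[1] - qy) * (r[0] - p[0]) - (p[0] - qx) * (r[1] - p[1])
--
--     def search(low, high):
--         if high < low: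
--             return low % n
--         mid = (low + high) // 2
--         p = hull[mid]
--         if cross(p, hull[(mid - 1) % n]) < 0:
--             return search(low, mid - 1)
--         if cross(p, hull[(mid + 1) % n]) < 0:
--             return search(mid + 1, high)
--         return mid
--
--     return search(0, n - 1)
-- ===== Notes on version B (the rewrite author's own statement) =====
-- stated objective: alternative
-- what changed: Replaces the imperative while-loop over mutable low/high with a recursive search(low, high) helper, drops the orientation_test sign classification in favour of direct cross-product comparisons, and reorders the branches (recurse on the failing side first, return mid last).
import Mathlib
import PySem

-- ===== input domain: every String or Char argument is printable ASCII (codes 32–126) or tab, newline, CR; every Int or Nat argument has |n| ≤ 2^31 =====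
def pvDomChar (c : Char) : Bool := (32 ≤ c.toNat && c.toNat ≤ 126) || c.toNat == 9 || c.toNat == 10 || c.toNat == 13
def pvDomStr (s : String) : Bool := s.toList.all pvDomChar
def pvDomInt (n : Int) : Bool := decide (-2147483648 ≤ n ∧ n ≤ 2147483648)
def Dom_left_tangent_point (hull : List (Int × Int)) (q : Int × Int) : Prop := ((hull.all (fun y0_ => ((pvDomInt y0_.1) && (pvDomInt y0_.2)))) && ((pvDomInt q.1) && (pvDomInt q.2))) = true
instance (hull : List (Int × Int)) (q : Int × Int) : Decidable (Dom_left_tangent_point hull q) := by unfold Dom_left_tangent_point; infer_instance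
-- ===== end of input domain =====

-- B replaces A's while-loop and orientation_test classification by a recursive
-- bounds-threading search over raw cross products with reordered branches (alternative; same cost).

-- ===== PORT A =====
def orientation_test (p q r : Int × Int) : Int :=
  let det := (q.2 - p.2) * (r.1 - q.1) - (q.1 - p.1) * (r.2 - q.2)
  if det > 0 then 1
  else if det < 0 then -1
  else 0

-- the while loop of A, threaded over (low, high); all list indices are in
-- [0, n) when called as A calls it (0 ≤ low, high ≤ n-1, n = hull.length > 0),
-- so the `.getD (0,0)` default is never taken (Python never raises here).
def ltpLoop (hull : List (Int × Int)) (q : Int × Int) (n low high : Int) : Int :=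
  if h : low ≤ high then
    let mid := PySem.Int.floordiv (low + high) 2
    let next_index := PySem.Int.mod (mid + 1) n
    let prev_index := PySem.Int.mod (mid - 1 + n) n
    let p := (PySem.List.pyGet? hull mid).getD (0, 0)
    let p_next := (PySem.List.pyGet? hull next_index).getD (0, 0)
    let p_prev := (PySem.List.pyGet? hull prev_index).getD (0, 0)
    if orientation_test q p p_next ≥ 0 ∧ orientation_test q p p_prev ≥ 0 then mid
    else if orientation_test q p p_prev < 0 then ltpLoop hull q n low (mid - 1)
    else ltpLoop hull q n (mid + 1) high
  else PySem.Int.mod low n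
termination_by (high - low + 1).toNat
decreasing_by
  all_goals
    have hb := PySem.Int.floordiv_two_mid_bounds h
    omega

def left_tangent_point (hull : List (Int × Int)) (q : Int × Int) : Int :=
  let n : Int := hull.length
  if n = 0 then -1
  else if n = 1 then 0
  else ltpLoop hull q n 0 (n - 1)

-- ===== PORT B =====
def ltpCross (qx qy : Int) (p r : Int × Int) : Int :=
  (p.2 - qy) * (r.1 - p.1) - (p.1 - qx) * (r.2 - p.2)

-- recursive binary search of B; as in A's port the indices are always in
-- range, so `.getD (0,0)` is never taken.
def ltpSearch (hull : List (Int × Int)) (qx qy n low high : Int) : Int :=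
  if h : high < low then PySem.Int.mod low n
  else
    let mid := PySem.Int.floordiv (low + high) 2
    let p := (PySem.List.pyGet? hull mid).getD (0, 0)
    if ltpCross qx qy p ((PySem.List.pyGet? hull (PySem.Int.mod (mid - 1) n)).getD (0, 0)) < 0 then
      ltpSearch hull qx qy n low (mid - 1)
    else if ltpCross qx qy p ((PySem.List.pyGet? hull (PySem.Int.mod (mid + 1) n)).getD (0, 0)) < 0 then
      ltpSearch hull qx qy n (mid + 1) high
    else mid
termination_by (high - low + 1).toNat
decreasing_by
  all_goals
    have hb := PySem.Int.floordiv_two_mid_bounds (by omega : low ≤ high)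
    omega

def left_tangent_point_alt (hull : List (Int × Int)) (q : Int × Int) : Int :=
  let n : Int := hull.length
  if n = 0 then -1
  else if n = 1 then 0
  else ltpSearch hull q.1 q.2 n 0 (n - 1)

-- ===== PRECONDITION & SPEC =====
def Spec_left_tangent_point (hull : List (Int × Int)) (q : Int × Int) (out : Int) : Prop := out = left_tangent_point_alt hull q
instance (hull : List (Int × Int)) (q : Int × Int) (out : Int) : Decidable (Spec_left_tangent_point hull q out) := by unfold Spec_left_tangent_point; infer_instance

-- ===== CLAIM (what is proved, stated in full; the proofs are below) =====
def Claim_equal_left_tangent_point : Prop := ∀ (hull : List (Int × Int)) (q : Int × Int), Dom_left_tangent_point hull q → Spec_left_tangent_point hull q (left_tangent_point hull q)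

-- ===== LEMMAS AND PROOFS =====

-- A's orientation_test and B's raw cross product have the same sign behaviour.
theorem orient_lt_iff (q p r : Int × Int) :
    orientation_test q p r < 0 ↔ ltpCross q.1 q.2 p r < 0 := by
  unfold orientation_test ltpCross
  dsimp only
  split_ifs with h1 h2 <;> omega

theorem orient_ge_iff (q p r : Int × Int) :
    0 ≤ orientation_test q p r ↔ 0 ≤ ltpCross q.1 q.2 p r := by
  unfold orientation_test ltpCross
  dsimp only
  split_ifs with h1 h2 <;> omega

-- Python's (mid-1+n) % n equals (mid-1) % n for n > 0.
theorem mod_add_self_eq (a n : Int) (hn : 0 < n) :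
    PySem.Int.mod (a + n) n = PySem.Int.mod a n := by
  rw [PySem.Int.mod_eq_emod_of_pos hn, PySem.Int.mod_eq_emod_of_pos hn, Int.add_emod_right]

theorem loop_eq_search (hull : List (Int × Int)) (q : Int × Int) (n : Int)
    (hn : 0 < n) (low high : Int) :
    ltpLoop hull q n low high = ltpSearch hull q.1 q.2 n low high := by
  unfold ltpLoop ltpSearch
  by_cases h : low ≤ high
  · rw [dif_pos h, dif_neg (by omega : ¬ high < low)]
    simp only
    rw [mod_add_self_eq _ _ hn]
    set mid := PySem.Int.floordiv (low + high) 2 with hmid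
    set p := (PySem.List.pyGet? hull mid).getD (0, 0) with hp
    set pn := (PySem.List.pyGet? hull (PySem.Int.mod (mid + 1) n)).getD (0, 0) with hpn
    set pp := (PySem.List.pyGet? hull (PySem.Int.mod (mid - 1) n)).getD (0, 0) with hpp
    have IHl := loop_eq_search hull q n hn low (mid - 1)
    have IHr := loop_eq_search hull q n hn (mid + 1) high
    by_cases hb : ltpCross q.1 q.2 p pp < 0
    · have : ¬ (orientation_test q p pn ≥ 0 ∧ orientation_test q p pp ≥ 0) := by
        intro ⟨_, h2⟩; rw [ge_iff_le, orient_ge_iff] at h2; omega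
      rw [if_neg this, if_pos ((orient_lt_iff q p pp).mpr hb), if_pos hb, IHl]
    · by_cases ha : ltpCross q.1 q.2 p pn < 0
      · have h1 : ¬ (orientation_test q p pn ≥ 0 ∧ orientation_test q p pp ≥ 0) := by
          intro ⟨h2, _⟩; rw [ge_iff_le, orient_ge_iff] at h2; omega
        rw [if_neg h1, if_neg (by rw [orient_lt_iff]; omega), if_neg hb, if_pos ha, IHr]
      · have h1 : orientation_test q p pn ≥ 0 ∧ orientation_test q p pp ≥ 0 := by
          constructor <;> rw [ge_iff_le, orient_ge_iff] <;> omega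
        rw [if_pos h1, if_neg hb, if_neg ha]
  · rw [dif_neg h, dif_pos (by omega : high < low)]
termination_by (high - low + 1).toNat
decreasing_by
  all_goals
    have hb := PySem.Int.floordiv_two_mid_bounds h
    omega

-- ===== VERDICT (by name: the statement is the Claim_ definition above) =====
theorem left_tangent_point_spec : Claim_equal_left_tangent_point := by
  intro hull q _
  unfold Spec_left_tangent_point left_tangent_point left_tangent_point_alt
  simp only
  by_cases h0 : (hull.length : Int) = 0
  · rw [if_pos h0, if_pos h0]
  · rw [if_neg h0, if_neg h0]
    by_cases h1 : (hull.length : Int) = 1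
    · rw [if_pos h1, if_pos h1]
    · rw [if_neg h1, if_neg h1]
      exact loop_eq_search hull q _ (by omega) 0 _
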